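-- pv_equiv track=rewrite | github.com/PanOscar/MaturaInf | Maturka/nowa/mat2017/1.2.py | prostokat
-- ===== SOURCE A (Python) =====
-- def prostokat(A, p):
--     n = len(A)
--     maks1 = 0
--     maks2 = 0
--     for i in range(n):
--         if(A[i]%p!=0):
--             if A[i] > maks1:
--                 maks2 = maks1
--                 maks1 = A[i]
--             elif A[i] > maks2:
--                 maks2 = A[i]
--     return maks1 * maks2
-- ===== SOURCE B (Python) =====
-- def prostokat(A, p):
--     cand = sorted((x for x in A if x % p != 0 and x > 0), reverse=True)
--     m1 = cand[0] if cand else 0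
--     m2 = cand[1] if len(cand) > 1 else 0
--     return m1 * m2
-- ===== Notes on version B (the rewrite author's own statement) =====
-- stated objective: simpler
-- what changed: Replaces the incremental two-maxima tracking loop by filtering qualifying positive elements, sorting them descending and taking the top two (defaulting to 0).
import Mathlib
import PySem

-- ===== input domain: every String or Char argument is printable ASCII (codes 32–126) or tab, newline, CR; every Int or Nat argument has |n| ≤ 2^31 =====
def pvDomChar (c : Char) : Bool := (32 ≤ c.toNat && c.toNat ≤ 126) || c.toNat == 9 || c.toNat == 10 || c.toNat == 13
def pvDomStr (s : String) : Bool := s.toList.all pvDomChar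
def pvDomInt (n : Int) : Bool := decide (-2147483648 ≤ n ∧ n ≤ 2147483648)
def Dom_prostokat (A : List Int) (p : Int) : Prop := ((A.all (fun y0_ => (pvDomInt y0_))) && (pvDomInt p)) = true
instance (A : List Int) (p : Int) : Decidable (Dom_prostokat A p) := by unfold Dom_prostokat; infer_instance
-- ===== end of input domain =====

-- B replaces A's incremental two-maxima loop by filter + sort-descending + top-two (objective: simpler).

-- ===== PORT A =====
-- one loop step of A's two-maxima tracking (state = (maks1, maks2))
def prostokatStep (p : Int) (m : Int × Int) (x : Int) : Int × Int :=
  if PySem.Int.mod x p ≠ 0 then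
    if x > m.1 then (x, m.1)
    else if x > m.2 then (m.1, x)
    else m
  else m

def prostokat (A : List Int) (p : Int) : Int :=
  let n : Int := PySem.List.len A
  let s := (PySem.List.pyRange 0 n 1).foldl
    (fun (m : Int × Int) i => prostokatStep p m (PySem.List.pyGetD A i 0)) (0, 0)
  s.1 * s.2

-- ===== PORT B =====
def prostokat_alt (A : List Int) (p : Int) : Int :=
  let cand := PySem.List.sorted (A.filter (fun x => decide (PySem.Int.mod x p ≠ 0 ∧ x > 0))) (fun x => x) true
  let m1 := match cand with | [] => 0 | a :: _ => a
  let m2 := match cand with | _ :: b :: _ => b | _ => 0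
  m1 * m2

-- ===== PRECONDITION & SPEC =====
-- Pre_ excludes only p = 0 with a nonempty A, where Python's '%' raises ZeroDivisionError in both programs.
def Pre_prostokat (A : List Int) (p : Int) : Prop := p ≠ 0 ∨ A = []
instance (A : List Int) (p : Int) : Decidable (Pre_prostokat A p) := by unfold Pre_prostokat; infer_instance
def pvWitness_prostokat : List Int × Int := ([3, 5, -4, 6], 2)
def Spec_prostokat (A : List Int) (p : Int) (out : Int) : Prop := out = prostokat_alt A p
instance (A : List Int) (p : Int) (out : Int) : Decidable (Spec_prostokat A p out) := by unfold Spec_prostokat; infer_instance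

-- ===== CLAIM (what is proved, stated in full; the proofs are below) =====
def Claim_equal_prostokat : Prop := ∀ (A : List Int) (p : Int), Dom_prostokat A p → Pre_prostokat A p → Spec_prostokat A p (prostokat A p)

-- ===== LEMMAS AND PROOFS =====

-- the unguarded insertion into the top-two state
def ins2 (m : Int × Int) (x : Int) : Int × Int :=
  if x > m.1 then (x, m.1) else if x > m.2 then (m.1, x) else m

lemma foldl_step_eq_filter (p : Int) (A : List Int) (m : Int × Int) :
    A.foldl (prostokatStep p) m
      = (A.filter (fun x => decide (PySem.Int.mod x p ≠ 0))).foldl ins2 m := by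
  induction A generalizing m with
  | nil => rfl
  | cons a t ih =>
    by_cases h : PySem.Int.mod a p ≠ 0 <;> simp [h, prostokatStep, ins2, ih]

-- nonpositive elements never change a state with 0 ≤ m2 ≤ m1
lemma foldl_ins2_filter_pos (l : List Int) (m : Int × Int) (h2 : 0 ≤ m.2) (h21 : m.2 ≤ m.1) :
    l.foldl ins2 m = (l.filter (fun x => decide (x > 0))).foldl ins2 m := by
  induction l generalizing m with
  | nil => rfl
  | cons a t ih =>
    by_cases h : a > 0
    · simp only [List.filter_cons, h, decide_true, if_pos, List.foldl_cons]
      have : 0 ≤ (ins2 m a).2 ∧ (ins2 m a).2 ≤ (ins2 m a).1 := by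
        unfold ins2; split_ifs <;> simp_all <;> omega
      exact ih _ this.1 this.2
    · have hs : ins2 m a = m := by unfold ins2; split_ifs <;> first | omega | rfl
      simp only [List.filter_cons, h, decide_false, if_neg, List.foldl_cons, hs, Bool.false_eq_true,
        not_false_eq_true]
      exact ih _ h2 h21

lemma ins2_comm (m : Int × Int) (x y : Int) : ins2 (ins2 m x) y = ins2 (ins2 m y) x := by
  unfold ins2
  rcases m with ⟨m1, m2⟩
  split_ifs <;> simp_all [Prod.ext_iff] <;> omega

-- elements ≤ m2 leave the state alone
lemma foldl_ins2_fixed (t : List Int) (m : Int × Int) (h : ∀ x ∈ t, x ≤ m.2) (h21 : m.2 ≤ m.1) :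
    t.foldl ins2 m = m := by
  induction t with
  | nil => rfl
  | cons a s ih =>
    have ha := h a (by simp)
    have hs : ins2 m a = m := by unfold ins2; split_ifs <;> first | omega | rfl
    simp only [List.foldl_cons, hs]
    exact ih (fun x hx => h x (by simp [hx]))

-- on a descending list of positive elements the fold yields (head, second) padded with 0
lemma foldl_ins2_sorted (l : List Int) (hpos : ∀ x ∈ l, 0 < x)
    (hsort : l.Pairwise (fun a b => b ≤ a)) :
    l.foldl ins2 (0, 0)
      = ((match l with | [] => 0 | a :: _ => a),
         (match l with | _ :: b :: _ => b | _ => 0)) := by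
  match l with
  | [] => rfl
  | [a] =>
    have ha := hpos a (by simp)
    simp [ins2]; omega
  | a :: b :: t =>
    have ha := hpos a (by simp)
    have hb := hpos b (by simp)
    have hba : b ≤ a := by
      rcases List.pairwise_cons.mp hsort with ⟨h1, _⟩
      exact h1 b (by simp)
    have h1 : ins2 (0, 0) a = (a, 0) := by unfold ins2; split_ifs with hc <;> simp_all
    have h2 : ins2 (a, 0) b = (a, b) := by unfold ins2; split_ifs <;> simp_all; omega
    have htle : ∀ x ∈ t, x ≤ b := by
      intro x hx
      have := (List.pairwise_cons.mp (List.pairwise_cons.mp hsort).2).1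
      exact this x hx
    simp only [List.foldl_cons, h1, h2]
    exact foldl_ins2_fixed t (a, b) htle hba

-- ===== VERDICT (by name: the statement is the Claim_ definition above) =====
theorem prostokat_spec : Claim_equal_prostokat := by
  intro A p _ hpre
  unfold Spec_prostokat prostokat prostokat_alt
  rcases hpre with hp | rfl
  · simp only [PySem.List.len_eq]
    rw [PySem.List.foldl_pyRange_zero_pyGetD' A 0 (prostokatStep p) (0, 0),
      foldl_step_eq_filter, foldl_ins2_filter_pos _ _ le_rfl le_rfl, List.filter_filter]
    have hpredeq :
        (A.filter (fun x => decide (x > 0) && decide (PySem.Int.mod x p ≠ 0)))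
          = A.filter (fun x => decide (PySem.Int.mod x p ≠ 0 ∧ x > 0)) := by
      apply List.filter_congr
      intro x _
      simp [and_comm]
    rw [hpredeq]
    set lq := A.filter (fun x => decide (PySem.Int.mod x p ≠ 0 ∧ x > 0)) with hlq
    have hperm : (PySem.List.sorted lq (fun x => x) true).Perm lq := PySem.List.sorted_perm _ _ _
    rw [hperm.symm.foldl_eq' (fun x _ y _ z => ins2_comm z x y) (0, 0)]
    have hpos : ∀ x ∈ PySem.List.sorted lq (fun x => x) true, 0 < x := by
      intro x hx
      have : x ∈ lq := (PySem.List.mem_sorted _ _ _ _).mp hx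
      rw [hlq, List.mem_filter] at this
      have := this.2
      simp at this
      omega
    have hsort : (PySem.List.sorted lq (fun x => x) true).Pairwise (fun a b => b ≤ a) :=
      PySem.List.sorted_pairwise_rev lq (fun x => x)
    rw [foldl_ins2_sorted _ hpos hsort]
  · rfl
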